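-- pv_equiv track=rewrite | github.com/adhithyasash1/dsa | week4/GRPA2.py | findMasterTank
-- ===== SOURCE A (Python) =====
-- from collections import deque
--
-- class myStack:
--   def __init__(self):
--     self.stack = deque()
--
--   def pop(self):
--     return self.stack.pop()
--
--   def push(self, x):
--     return self.stack.append(x)
--
--   def isEmpty(self):
--     return False if self.stack else True
--
-- def runDFSForTankT(tanks, GList, t, visited):
--   s = myStack()
--   s.push(t)
--   visited[t] = True
--
--   while not s.isEmpty():
--     i = s.pop()
--     for p in GList[i]:
--       if not visited[p]:
--         s.push(p)
--         visited[p] = True;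
--
-- def findMasterTank(tanks, pipes):
--   # Create an adjacency list for graph representing the system of pipes and tanks.
--   GList = {}
--   for i in tanks:
--     GList[i]=[]
--   for (i,j) in pipes:
--     GList[i].append(j)
--
--   # Mark every tank not visited.
--   visited = {t:False for t in tanks}
--
--   lastVisited = tanks[0]
--   # Traverse the tanks through depth first search method and keep track of last visited tank.
--   for t in tanks:
--     if not visited[t]:
--       runDFSForTankT(tanks, GList, t, visited)
--       lastVisited = t
--
--   # Check if this last visited tank has paths to all other tanks in the system by doing another depth first search.
--   visited = {t:False for t in tanks}
--   runDFSForTankT(tanks, GList, lastVisited, visited)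
--
--   # Check visited to verify if all tanks are visited.
--   for v in visited:
--     if not visited[v]:
--       return 0
--   return lastVisited
-- ===== SOURCE B (Python) =====
-- def findMasterTank(tanks, pipes):
--     # Mother-vertex by iterative set closure over the adjacency lists (no DFS, no stack).
--     adj = {t: [] for t in tanks}
--     for (i, j) in pipes:
--         adj[i].append(j)
--
--     def close(start):
--         r = {start}
--         for _ in range(len(tanks)):
--             r |= {j for i in r for j in adj[i]}
--         return r
--
--     visited = set()
--     last = tanks[0]
--     for t in tanks:
--         if t not in visited:
--             visited |= close(t)
--             last = t
--     reach = close(last)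
--     return last if all(t in reach for t in tanks) else 0
-- ===== Notes on version B (the rewrite author's own statement) =====
-- stated objective: alternative
-- what changed: Replaces A's explicit-stack DFS (the myStack class and its while-loop) by an iterative set-closure: reachability is computed by repeatedly relaxing the reached set through the adjacency lists for len(tanks) rounds, used both to accumulate the phase-1 visited set and for the final verification.
import Mathlib
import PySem

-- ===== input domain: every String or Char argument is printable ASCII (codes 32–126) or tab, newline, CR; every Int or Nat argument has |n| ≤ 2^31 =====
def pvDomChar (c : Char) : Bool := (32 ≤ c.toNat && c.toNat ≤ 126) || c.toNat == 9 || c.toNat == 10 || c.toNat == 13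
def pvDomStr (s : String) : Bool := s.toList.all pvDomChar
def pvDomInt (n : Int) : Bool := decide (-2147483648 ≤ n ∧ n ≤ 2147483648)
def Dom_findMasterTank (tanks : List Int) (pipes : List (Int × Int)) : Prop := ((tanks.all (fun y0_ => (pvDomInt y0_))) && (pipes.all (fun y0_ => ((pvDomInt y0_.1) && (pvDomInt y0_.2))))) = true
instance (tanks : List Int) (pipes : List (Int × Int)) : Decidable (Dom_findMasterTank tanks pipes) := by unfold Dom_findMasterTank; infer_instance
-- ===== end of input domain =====

-- B replaces A's explicit-stack DFS (myStack class + while loop) by an iterative set-closure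
-- (round-based relaxation) over the adjacency lists; objective: alternative (not faster).

-- ===== PORT A =====

-- number of keys currently mapped to False (termination measure for the while-loop)
def falseCount (v : PySem.Dict Int Bool) : Nat := v.items.countP (fun kv => kv.2 == false)

-- one iteration of A's inner 'for p in GList[i]' body
def dfsStep (sv : List Int × PySem.Dict Int Bool) (p : Int) : List Int × PySem.Dict Int Bool :=
  match sv.2.get? p with
  | none => sv          -- Python: visited[p] raises KeyError here; Pre_ excludes such inputs
  | some b => if b then sv else (p :: sv.1, sv.2.insert p true)

lemma countP_map_replace_le (p : Int) (l : List (Int × Bool)) :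
    (l.map (fun q => if q.1 == p then (p, true) else q)).countP (fun kv => kv.2 == false)
      ≤ l.countP (fun kv => kv.2 == false) := by
  induction l with
  | nil => simp
  | cons q l ih =>
    simp only [List.map_cons, List.countP_cons]
    by_cases h : (q.1 == p) = true
    · rw [if_pos h]
      simp only [show (((p, true).2 == false)) = false from rfl]
      rw [if_neg (by decide : ¬ (false = true))]
      split <;> omega
    · rw [if_neg h]
      split <;> omega

lemma countP_find_false_lt (p : Int) (l : List (Int × Bool))
    (h : (l.find? (fun q => q.1 == p)).map (·.2) = some false) :
    (l.map (fun q => if q.1 == p then (p, true) else q)).countP (fun kv => kv.2 == false)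
      < l.countP (fun kv => kv.2 == false) := by
  induction l with
  | nil => simp at h
  | cons q l ih =>
    simp only [List.map_cons, List.countP_cons]
    by_cases hq : (q.1 == p) = true
    · simp only [List.find?_cons, hq] at h
      simp only [Option.map_some, Option.some.injEq] at h
      rw [if_pos hq]
      simp only [show (((p, true).2 == false)) = false from rfl, h]
      rw [if_neg (by decide : ¬ (false = true)), if_pos (by decide : (false == false) = true)]
      have := countP_map_replace_le p l
      omega
    · simp only [List.find?_cons, hq] at h
      have := ih h
      rw [if_neg hq]
      split <;> omega

lemma falseCount_insert_lt (v : PySem.Dict Int Bool) (p : Int)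
    (h : v.get? p = some false) : falseCount (v.insert p true) < falseCount v := by
  have hc : v.contains p = true := by
    rw [PySem.Dict.contains_eq_isSome_get?, h]; rfl
  have h' : (v.items.find? (fun q => q.1 == p)).map (·.2) = some false := h
  simp only [PySem.Dict.insert, hc, if_pos, falseCount]
  exact countP_find_false_lt p v.items h'

lemma measure_dfsStep (sv : List Int × PySem.Dict Int Bool) (p : Int) :
    2 * falseCount (dfsStep sv p).2 + (dfsStep sv p).1.length
      ≤ 2 * falseCount sv.2 + sv.1.length := by
  unfold dfsStep
  cases hg : sv.2.get? p with
  | none => simp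
  | some b =>
    cases b with
    | true => simp
    | false =>
      have := falseCount_insert_lt sv.2 p hg
      simp only [if_neg Bool.false_ne_true, List.length_cons]
      omega

lemma measure_foldl (nbrs : List Int) :
    ∀ sv : List Int × PySem.Dict Int Bool,
      2 * falseCount (nbrs.foldl dfsStep sv).2 + (nbrs.foldl dfsStep sv).1.length
        ≤ 2 * falseCount sv.2 + sv.1.length := by
  induction nbrs with
  | nil => intro sv; simp
  | cons p nbrs ih =>
    intro sv
    calc 2 * falseCount ((p :: nbrs).foldl dfsStep sv).2 + ((p :: nbrs).foldl dfsStep sv).1.length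
        = 2 * falseCount (nbrs.foldl dfsStep (dfsStep sv p)).2 + (nbrs.foldl dfsStep (dfsStep sv p)).1.length := by simp
      _ ≤ 2 * falseCount (dfsStep sv p).2 + (dfsStep sv p).1.length := ih _
      _ ≤ _ := measure_dfsStep sv p

lemma measure_foldl' (nbrs : List Int) (st : List Int) (vis : PySem.Dict Int Bool) :
    2 * falseCount (nbrs.foldl dfsStep (st, vis)).2 + (nbrs.foldl dfsStep (st, vis)).1.length
      ≤ 2 * falseCount vis + st.length := by
  simpa using measure_foldl nbrs (st, vis)

-- A's while-loop in runDFSForTankT (stack top = list head; deque append/pop is the right end)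
def runDFSLoop (G : PySem.Dict Int (List Int)) : List Int → PySem.Dict Int Bool → PySem.Dict Int Bool
  | [], visited => visited
  | i :: rest, visited =>
    let sv := ((G.get? i).getD []).foldl dfsStep (rest, visited)  -- GList[i]; i is always a key under Pre_
    runDFSLoop G sv.1 sv.2
termination_by stack visited => 2 * falseCount visited + stack.length
decreasing_by
  have h := measure_foldl' ((G.get? i).getD []) rest visited
  simp only [List.length_cons]
  omega

def runDFSForTankT (_tanks : List Int) (G : PySem.Dict Int (List Int)) (t : Int)
    (visited : PySem.Dict Int Bool) : PySem.Dict Int Bool :=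
  runDFSLoop G [t] (visited.insert t true)

def findMasterTank (tanks : List Int) (pipes : List (Int × Int)) : Int :=
  let GList := pipes.foldl
    (fun d p => match d.get? p.1 with
      | some l => d.insert p.1 (l ++ [p.2])
      | none => d          -- Python: GList[i].append raises KeyError here; Pre_ excludes such inputs
      )
    (tanks.foldl (fun d i => d.insert i ([] : List Int)) PySem.Dict.empty)
  let visited0 := tanks.foldl (fun d t => d.insert t false) PySem.Dict.empty
  match PySem.List.pyGet? tanks 0 with
  | none => 0              -- Python: tanks[0] raises IndexError; Pre_ excludes the empty list
  | some t0 =>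
    let p1 := tanks.foldl
      (fun (st : PySem.Dict Int Bool × Int) t =>
        if st.1.getD t false then st else (runDFSForTankT tanks GList t st.1, t))
      (visited0, t0)
    let lastVisited := p1.2
    let visited2 := tanks.foldl (fun d t => d.insert t false) PySem.Dict.empty
    let visitedF := runDFSForTankT tanks GList lastVisited visited2
    if visitedF.keys.all (fun v => visitedF.getD v false) then lastVisited else 0

-- ===== PORT B =====

-- close(start): iterate 'r |= {j for i in r for j in adj[i]}' len(tanks) times
def closeTank (tanks : List Int) (adj : PySem.Dict Int (List Int)) (start : Int) : PySem.Set Int :=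
  (List.range tanks.length).foldl
    (fun r _ => PySem.Set.update r (r.flatMap (fun i => (adj.get? i).getD [])))  -- adj[i]; KeyError for i not a key is excluded by Pre_
    (PySem.Set.ofList [start])

def findMasterTank_alt (tanks : List Int) (pipes : List (Int × Int)) : Int :=
  let adj := pipes.foldl
    (fun d p => match d.get? p.1 with
      | some l => d.insert p.1 (l ++ [p.2])
      | none => d          -- Python: adj[i].append raises KeyError here; Pre_ excludes such inputs
      )
    (tanks.foldl (fun d i => d.insert i ([] : List Int)) PySem.Dict.empty)
  match PySem.List.pyGet? tanks 0 with
  | none => 0              -- Python: tanks[0] raises IndexError; Pre_ excludes the empty list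
  | some t0 =>
    let p1 := tanks.foldl
      (fun (st : PySem.Set Int × Int) t =>
        if PySem.Set.contains st.1 t then st
        else (PySem.Set.update st.1 (closeTank tanks adj t), t))
      (PySem.Set.empty, t0)
    let last := p1.2
    let reach := closeTank tanks adj last
    if tanks.all (fun t => PySem.Set.contains reach t) then last else 0

-- ===== PRECONDITION & SPEC =====
-- Pre_ excludes exactly the inputs where A raises: an empty tank list (IndexError on tanks[0])
-- and any pipe with an endpoint that is not a tank (KeyError in GList/visited lookups).
def Pre_findMasterTank (tanks : List Int) (pipes : List (Int × Int)) : Prop :=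
  tanks ≠ [] ∧ ∀ p ∈ pipes, p.1 ∈ tanks ∧ p.2 ∈ tanks
instance (tanks : List Int) (pipes : List (Int × Int)) : Decidable (Pre_findMasterTank tanks pipes) := by
  unfold Pre_findMasterTank; infer_instance

def pvWitness_findMasterTank : List Int × (List (Int × Int)) := ([1, 2, 0, 1, 2, 3, 4, -1, -2, 6], [(1, 2), (2, 1)])

def Spec_findMasterTank (tanks : List Int) (pipes : List (Int × Int)) (out : Int) : Prop := out = findMasterTank_alt tanks pipes
instance (tanks : List Int) (pipes : List (Int × Int)) (out : Int) : Decidable (Spec_findMasterTank tanks pipes out) := by unfold Spec_findMasterTank; infer_instance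

-- ===== CLAIM (what is proved, stated in full; the proofs are below) =====
def Claim_equal_findMasterTank : Prop := ∀ (tanks : List Int) (pipes : List (Int × Int)), Dom_findMasterTank tanks pipes → Pre_findMasterTank tanks pipes → Spec_findMasterTank tanks pipes (findMasterTank tanks pipes)
-- ===== LEMMAS AND PROOFS =====

-- reachability along pipes
inductive Reach (pipes : List (Int × Int)) (s : Int) : Int → Prop
  | refl : Reach pipes s s
  | step {i j : Int} : Reach pipes s i → (i, j) ∈ pipes → Reach pipes s j

lemma Reach.trans {pipes : List (Int × Int)} {a b c : Int}
    (h1 : Reach pipes a b) (h2 : Reach pipes b c) : Reach pipes a c := by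
  induction h2 with
  | refl => exact h1
  | step _ hm ih => exact Reach.step ih hm

-- adjacency list of x as A builds it
def adjOf (pipes : List (Int × Int)) (x : Int) : List Int :=
  (pipes.filter (fun p => p.1 == x)).map (·.2)

lemma mem_adjOf {pipes : List (Int × Int)} {x y : Int} :
    y ∈ adjOf pipes x ↔ (x, y) ∈ pipes := by
  simp only [adjOf, List.mem_map, List.mem_filter, beq_iff_eq]
  constructor
  · rintro ⟨⟨i, j⟩, ⟨hm, rfl⟩, rfl⟩; exact hm
  · intro h; exact ⟨(x, y), ⟨h, rfl⟩, rfl⟩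

-- the visited dict represents the set S of visited tanks
def VRep (tanks : List Int) (v : PySem.Dict Int Bool) (S : List Int) : Prop :=
  ∀ x : Int, v.get? x = if x ∈ tanks then some (decide (x ∈ S)) else none

lemma foldl_insert_const_get? {β : Type} (c : β) (tanks : List Int) (x : Int) :
    (tanks.foldl (fun d t => d.insert t c) PySem.Dict.empty).get? x
      = if x ∈ tanks then some c else none := by
  induction tanks using List.reverseRecOn with
  | nil => simp [PySem.Dict.get?_empty]
  | append_singleton l a ih =>
    rw [List.foldl_append]
    simp only [List.foldl_cons, List.foldl_nil, PySem.Dict.get?_insert, List.mem_append,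
      List.mem_singleton, ih]
    by_cases hx : x = a <;> simp [hx]

lemma rep_build (tanks : List Int) :
    VRep tanks (tanks.foldl (fun d t => d.insert t false) PySem.Dict.empty) [] := by
  intro x
  simpa using foldl_insert_const_get? false tanks x

lemma adjOf_append {P : List (Int × Int)} {p : Int × Int} {x : Int} :
    adjOf (P ++ [p]) x = if p.1 = x then adjOf P x ++ [p.2] else adjOf P x := by
  simp only [adjOf, List.filter_append]
  by_cases h : p.1 = x
  · simp [h]
  · simp [h]

lemma G_spec (tanks : List Int) (pipes : List (Int × Int))
    (hP : ∀ p ∈ pipes, p.1 ∈ tanks) (x : Int) :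
    (pipes.foldl
      (fun d p => match d.get? p.1 with
        | some l => d.insert p.1 (l ++ [p.2])
        | none => d)
      (tanks.foldl (fun d i => d.insert i ([] : List Int)) PySem.Dict.empty)).get? x
    = if x ∈ tanks then some (adjOf pipes x) else none := by
  induction pipes using List.reverseRecOn generalizing x with
  | nil =>
    simpa [adjOf] using foldl_insert_const_get? ([] : List Int) tanks x
  | append_singleton P p ih =>
    have hP' : ∀ q ∈ P, q.1 ∈ tanks := fun q hq => hP q (by simp [hq])
    have hp1 : p.1 ∈ tanks := hP p (by simp)
    have hm := ih hP' p.1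
    rw [if_pos hp1] at hm
    rw [List.foldl_append]
    simp only [List.foldl_cons, List.foldl_nil, hm]
    rw [PySem.Dict.get?_insert]
    by_cases hx : x = p.1
    · rw [if_pos hx, hx, adjOf_append, if_pos rfl, if_pos hp1]
    · rw [if_neg hx, ih hP' x, adjOf_append]
      rw [if_neg (show ¬ p.1 = x from fun h => hx h.symm)]

lemma fold_step_char (tanks : List Int) :
    ∀ (nbrs : List Int) (st : List Int) (vis : PySem.Dict Int Bool) (S : List Int),
      VRep tanks vis S → (∀ y ∈ nbrs, y ∈ tanks) →
      ∃ (P : List Int) (vis' : PySem.Dict Int Bool),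
        nbrs.foldl dfsStep (st, vis) = (P ++ st, vis') ∧
        VRep tanks vis' (P ++ S) ∧ (∀ y ∈ P, y ∈ nbrs) ∧ (∀ y ∈ nbrs, y ∈ P ++ S) := by
  intro nbrs
  induction nbrs with
  | nil =>
    intro st vis S hrep _
    exact ⟨[], vis, rfl, hrep, by simp, by simp⟩
  | cons y nbrs ih =>
    intro st vis S hrep hn
    have hyt : y ∈ tanks := hn y List.mem_cons_self
    have hy : vis.get? y = some (decide (y ∈ S)) := by rw [hrep y, if_pos hyt]
    simp only [List.foldl_cons]
    by_cases hyS : y ∈ S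
    · have hstep : dfsStep (st, vis) y = (st, vis) := by
        unfold dfsStep
        rw [hy]
        simp [hyS]
      rw [hstep]
      obtain ⟨P, vis', heq, hrep', hPn, hcov⟩ :=
        ih st vis S hrep (fun z hz => hn z (List.mem_cons_of_mem _ hz))
      refine ⟨P, vis', heq, hrep', fun z hz => List.mem_cons_of_mem _ (hPn z hz), ?_⟩
      intro z hz
      rcases List.mem_cons.mp hz with rfl | hz
      · exact List.mem_append_right _ hyS
      · exact hcov z hz
    · have hstep : dfsStep (st, vis) y = (y :: st, vis.insert y true) := by
        unfold dfsStep
        rw [hy]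
        simp [hyS]
      rw [hstep]
      have hrep2 : VRep tanks (vis.insert y true) (y :: S) := by
        intro x
        rw [PySem.Dict.get?_insert]
        by_cases hx : x = y
        · subst hx
          simp [hyt]
        · rw [if_neg hx, hrep x]
          by_cases hxt : x ∈ tanks
          · rw [if_pos hxt, if_pos hxt]
            congr 1
            simp [List.mem_cons, hx]
          · rw [if_neg hxt, if_neg hxt]
      obtain ⟨P, vis', heq, hrep', hPn, hcov⟩ :=
        ih (y :: st) (vis.insert y true) (y :: S) hrep2
          (fun z hz => hn z (List.mem_cons_of_mem _ hz))
      refine ⟨P ++ [y], vis', by rw [heq]; simp, by simpa using hrep', ?_, ?_⟩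
      · intro z hz
        rcases List.mem_append.mp hz with hz | hz
        · exact List.mem_cons_of_mem _ (hPn z hz)
        · simp at hz; subst hz; exact List.mem_cons_self
      · intro z hz
        rcases List.mem_cons.mp hz with rfl | hz
        · exact List.mem_append_left _ (List.mem_append_right _ (by simp))
        · have := hcov z hz
          rcases List.mem_append.mp this with h | h
          · exact List.mem_append_left _ (List.mem_append_left _ h)
          · rcases List.mem_cons.mp h with rfl | h
            · exact List.mem_append_left _ (List.mem_append_right _ (by simp))
            · exact List.mem_append_right _ h

lemma dfs_char (tanks : List Int) (pipes : List (Int × Int)) (G : PySem.Dict Int (List Int))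
    (hP : ∀ p ∈ pipes, p.1 ∈ tanks ∧ p.2 ∈ tanks)
    (hG : ∀ x : Int, G.get? x = if x ∈ tanks then some (adjOf pipes x) else none) :
    ∀ (L : List Int) (v : PySem.Dict Int Bool) (S : List Int),
      VRep tanks v S → (∀ l ∈ L, l ∈ S) → (∀ x ∈ S, x ∈ tanks) →
      ∃ S' : List Int,
        VRep tanks (runDFSLoop G L v) S' ∧
        (∀ x ∈ S, x ∈ S') ∧ (∀ x ∈ S', x ∈ tanks) ∧
        (∀ x ∈ S', x ∈ S ∨ ∃ l ∈ L, Reach pipes l x) ∧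
        (∀ x : Int, (x ∈ L ∨ (x ∈ S' ∧ x ∉ S)) → ∀ y : Int, (x, y) ∈ pipes → y ∈ S') := by
  intro L v
  induction L, v using runDFSLoop.induct (G := G) with
  | case1 v =>
    intro S hrep hstack hS
    refine ⟨S, by rwa [runDFSLoop], fun x hx => hx, hS, fun x hx => Or.inl hx, ?_⟩
    rintro x (hx | ⟨hmem, hnot⟩) y hy
    · simp at hx
    · exact absurd hmem hnot
  | case2 i rest v sv ih =>
    intro S hrep hstack hS
    have hsv : sv = List.foldl dfsStep (rest, v) ((G.get? i).getD []) := rfl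
    rw [hsv] at ih
    have hi : i ∈ tanks := hS i (hstack i List.mem_cons_self)
    have hnbrs : (G.get? i).getD [] = adjOf pipes i := by rw [hG i, if_pos hi]; rfl
    have hnt : ∀ y ∈ adjOf pipes i, y ∈ tanks := by
      intro y hy
      exact (hP _ (mem_adjOf.mp hy)).2
    obtain ⟨P, vis', heq, hrep', hPn, hcov⟩ :=
      fold_step_char tanks ((G.get? i).getD []) rest v S hrep
        (by rw [hnbrs]; exact hnt)
    have hPn' : ∀ z ∈ P, z ∈ adjOf pipes i := by rw [← hnbrs]; exact hPn
    have hcov' : ∀ z ∈ adjOf pipes i, z ∈ P ++ S := by rw [← hnbrs]; exact hcov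
    have hPreach : ∀ z ∈ P, Reach pipes i z := by
      intro z hz
      exact Reach.step Reach.refl (mem_adjOf.mp (hPn' z hz))
    rw [heq] at ih
    obtain ⟨S', h1, h2, h3, h4, h5⟩ := ih (P ++ S) hrep'
      (by
        intro l hl
        rcases List.mem_append.mp hl with hl | hl
        · exact List.mem_append_left _ hl
        · exact List.mem_append_right _ (hstack l (List.mem_cons_of_mem _ hl)))
      (by
        intro x hx
        rcases List.mem_append.mp hx with hx | hx
        · exact hnt x (hPn' x hx)
        · exact hS x hx)
    rw [runDFSLoop]
    simp only [heq]
    refine ⟨S', h1, ?_, h3, ?_, ?_⟩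
    · intro x hx
      exact h2 x (List.mem_append_right _ hx)
    · intro x hx
      rcases h4 x hx with hx' | ⟨l, hl, hr⟩
      · rcases List.mem_append.mp hx' with hx' | hx'
        · exact Or.inr ⟨i, List.mem_cons_self, hPreach x hx'⟩
        · exact Or.inl hx'
      · rcases List.mem_append.mp hl with hl | hl
        · exact Or.inr ⟨i, List.mem_cons_self, (hPreach l hl).trans hr⟩
        · exact Or.inr ⟨l, List.mem_cons_of_mem _ hl, hr⟩
    · rintro x (hx | ⟨hmem, hnot⟩) y hy
      · rcases List.mem_cons.mp hx with rfl | hx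
        · -- x = i: every neighbour of i landed in P ++ S ⊆ S'
          exact h2 y (hcov' y (mem_adjOf.mpr hy))
        · exact h5 x (Or.inl (List.mem_append_right _ hx)) y hy
      · by_cases hxP : x ∈ P
        · exact h5 x (Or.inl (List.mem_append_left _ hxP)) y hy
        · refine h5 x (Or.inr ⟨hmem, ?_⟩) y hy
          intro hc
          rcases List.mem_append.mp hc with hc | hc
          · exact hxP hc
          · exact hnot hc

-- one relaxation step of B's close loop
def closeStep (adj : PySem.Dict Int (List Int)) (r : PySem.Set Int) : PySem.Set Int :=
  PySem.Set.update r (r.flatMap (fun i => (adj.get? i).getD []))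

lemma foldl_range_iterate {α : Type} (f : α → α) (n : Nat) (a : α) :
    (List.range n).foldl (fun r _ => f r) a = f^[n] a := by
  induction n with
  | zero => simp
  | succ n ih => rw [List.range_succ, List.foldl_append, Function.iterate_succ_apply', ih]; rfl

lemma closeTank_eq (tanks : List Int) (adj : PySem.Dict Int (List Int)) (t : Int) :
    closeTank tanks adj t = (closeStep adj)^[tanks.length] (PySem.Set.ofList [t]) := by
  unfold closeTank closeStep
  exact foldl_range_iterate _ tanks.length _

lemma mem_closeStep {tanks : List Int} {pipes : List (Int × Int)} {adj : PySem.Dict Int (List Int)}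
    (hG : ∀ x : Int, adj.get? x = if x ∈ tanks then some (adjOf pipes x) else none)
    {r : PySem.Set Int} (hsub : ∀ x ∈ r, x ∈ tanks) {x : Int} :
    x ∈ closeStep adj r ↔ x ∈ r ∨ ∃ p ∈ pipes, p.1 ∈ r ∧ p.2 = x := by
  simp only [closeStep, PySem.Set.mem_update, List.mem_flatMap]
  constructor
  · rintro (h | ⟨i, hi, hx⟩)
    · exact Or.inl h
    · rw [hG i, if_pos (hsub i hi)] at hx
      exact Or.inr ⟨(i, x), mem_adjOf.mp hx, hi, rfl⟩
  · rintro (h | ⟨p, hp, hm, rfl⟩)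
    · exact Or.inl h
    · refine Or.inr ⟨p.1, hm, ?_⟩
      rw [hG p.1, if_pos (hsub p.1 hm)]
      exact mem_adjOf.mpr hp

lemma closeStep_eq_append {adj : PySem.Dict Int (List Int)} (r : PySem.Set Int) :
    ∃ e, closeStep adj r = r ++ e := by
  unfold closeStep
  rw [PySem.Set.update_eq_append_filter]
  exact ⟨_, rfl⟩

lemma closeStep_closed_of_fixed {tanks : List Int} {pipes : List (Int × Int)}
    {adj : PySem.Dict Int (List Int)}
    (hG : ∀ x : Int, adj.get? x = if x ∈ tanks then some (adjOf pipes x) else none)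
    {r : PySem.Set Int} (hsub : ∀ x ∈ r, x ∈ tanks)
    (h : closeStep adj r = r) : ∀ p ∈ pipes, p.1 ∈ r → p.2 ∈ r := by
  intro p hp h1
  have : p.2 ∈ closeStep adj r := (mem_closeStep hG hsub).mpr (Or.inr ⟨p, hp, h1, rfl⟩)
  rwa [h] at this

lemma closeStep_fixed_iterate {adj : PySem.Dict Int (List Int)} {r : PySem.Set Int}
    (h : closeStep adj r = r) (m : Nat) : (closeStep adj)^[m] r = r := by
  induction m with
  | zero => rfl
  | succ m ih => rw [Function.iterate_succ_apply, h, ih]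

lemma closeStep_nodup {adj : PySem.Dict Int (List Int)} {r : PySem.Set Int}
    (h : r.Nodup) : (closeStep adj r).Nodup := PySem.Set.nodup_update _ _ h

lemma closeStep_subset {tanks : List Int} {pipes : List (Int × Int)}
    {adj : PySem.Dict Int (List Int)}
    (hP : ∀ p ∈ pipes, p.1 ∈ tanks ∧ p.2 ∈ tanks)
    (hG : ∀ x : Int, adj.get? x = if x ∈ tanks then some (adjOf pipes x) else none)
    {r : PySem.Set Int}
    (h : ∀ x ∈ r, x ∈ tanks) : ∀ x ∈ closeStep adj r, x ∈ tanks := by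
  intro x hx
  rcases (PySem.Set.mem_update _ _ _).mp hx with hx | hx
  · exact h x hx
  · obtain ⟨i, hi, hxi⟩ := List.mem_flatMap.mp hx
    rw [hG i] at hxi
    by_cases hit : i ∈ tanks
    · rw [if_pos hit] at hxi
      exact (hP _ (mem_adjOf.mp hxi)).2
    · rw [if_neg hit] at hxi
      simp at hxi

lemma close_iter_fixed {tanks : List Int} {pipes : List (Int × Int)}
    {adj : PySem.Dict Int (List Int)}
    (hP : ∀ p ∈ pipes, p.1 ∈ tanks ∧ p.2 ∈ tanks)
    (hG : ∀ x : Int, adj.get? x = if x ∈ tanks then some (adjOf pipes x) else none) :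
    ∀ (m : Nat) (r : PySem.Set Int), r.Nodup → (∀ x ∈ r, x ∈ tanks) →
      (PySem.Set.ofList tanks).length ≤ r.length + m →
      closeStep adj ((closeStep adj)^[m] r) = (closeStep adj)^[m] r := by
  intro m
  induction m with
  | zero =>
    intro r hnd hsub hlen
    simp only [Function.iterate_zero, id]
    obtain ⟨e, he⟩ := closeStep_eq_append (adj := adj) r
    have hnd' : (closeStep adj r).Nodup := closeStep_nodup hnd
    have hsub' : ∀ x ∈ closeStep adj r, x ∈ PySem.Set.ofList tanks := by
      intro x hx
      exact (PySem.Set.mem_ofList _ _).mpr (closeStep_subset hP hG hsub x hx)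
    have hle : (closeStep adj r).length ≤ (PySem.Set.ofList tanks).length := by
      simpa using List.Subperm.length_le (List.subperm_of_subset hnd' hsub')
    have : e = [] := by
      rw [he] at hle
      simp only [List.length_append] at hle
      have : e.length = 0 := by omega
      exact List.length_eq_zero_iff.mp this
    rw [he, this, List.append_nil]
  | succ m ih =>
    intro r hnd hsub hlen
    by_cases hfix : closeStep adj r = r
    · rw [closeStep_fixed_iterate hfix, hfix]
    · obtain ⟨e, he⟩ := closeStep_eq_append (adj := adj) r
      have hlen' : r.length + 1 ≤ (closeStep adj r).length := by
        rcases e with _ | ⟨y, e⟩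
        · exact absurd (by rw [he, List.append_nil]) hfix
        · rw [he]; simp only [List.length_append, List.length_cons]; omega
      rw [Function.iterate_succ_apply]
      exact ih (closeStep adj r) (closeStep_nodup hnd) (closeStep_subset hP hG hsub)
        (by omega)

lemma mem_iterate_of_mem {adj : PySem.Dict Int (List Int)} {r : PySem.Set Int} {x : Int}
    (h : x ∈ r) (m : Nat) : x ∈ (closeStep adj)^[m] r := by
  induction m generalizing r h with
  | zero => exact h
  | succ m ih =>
    rw [Function.iterate_succ_apply]
    exact ih ((PySem.Set.mem_update _ _ _).mpr (Or.inl h))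

lemma iterate_subset {tanks : List Int} {pipes : List (Int × Int)}
    {adj : PySem.Dict Int (List Int)}
    (hP : ∀ p ∈ pipes, p.1 ∈ tanks ∧ p.2 ∈ tanks)
    (hG : ∀ x : Int, adj.get? x = if x ∈ tanks then some (adjOf pipes x) else none)
    {r : PySem.Set Int} (h : ∀ x ∈ r, x ∈ tanks) (m : Nat) :
    ∀ x ∈ (closeStep adj)^[m] r, x ∈ tanks := by
  induction m generalizing r h with
  | zero => exact h
  | succ m ih =>
    rw [Function.iterate_succ_apply]
    exact ih (closeStep_subset hP hG h)

lemma iterate_sound {tanks : List Int} {pipes : List (Int × Int)}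
    {adj : PySem.Dict Int (List Int)}
    (hG : ∀ x : Int, adj.get? x = if x ∈ tanks then some (adjOf pipes x) else none)
    {t : Int} {r : PySem.Set Int}
    (h : ∀ x ∈ r, Reach pipes t x) (m : Nat) :
    ∀ x ∈ (closeStep adj)^[m] r, Reach pipes t x := by
  induction m generalizing r h with
  | zero => exact h
  | succ m ih =>
    rw [Function.iterate_succ_apply]
    refine ih ?_
    intro x hx
    rcases (PySem.Set.mem_update _ _ _).mp hx with hx | hx
    · exact h x hx
    · obtain ⟨i, hi, hxi⟩ := List.mem_flatMap.mp hx
      rw [hG i] at hxi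
      by_cases hit : i ∈ tanks
      · rw [if_pos hit] at hxi
        exact Reach.step (h i hi) (mem_adjOf.mp hxi)
      · rw [if_neg hit] at hxi
        simp at hxi

lemma close_mem (tanks : List Int) (pipes : List (Int × Int)) (adj : PySem.Dict Int (List Int))
    (hP : ∀ p ∈ pipes, p.1 ∈ tanks ∧ p.2 ∈ tanks)
    (hG : ∀ x : Int, adj.get? x = if x ∈ tanks then some (adjOf pipes x) else none)
    (t : Int) (ht : t ∈ tanks) (x : Int) :
    x ∈ closeTank tanks adj t ↔ Reach pipes t x := by
  rw [closeTank_eq]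
  have hsub0 : ∀ x ∈ PySem.Set.ofList [t], x ∈ tanks := by
    intro x hx
    simp only [PySem.Set.mem_ofList, List.mem_singleton] at hx
    rwa [hx]
  have hfix : closeStep adj ((closeStep adj)^[tanks.length] (PySem.Set.ofList [t]))
      = (closeStep adj)^[tanks.length] (PySem.Set.ofList [t]) := by
    refine close_iter_fixed hP hG tanks.length _ (PySem.Set.nodup_ofList _) hsub0 ?_
    have h1 := PySem.Set.length_ofList_le (xs := tanks)
    have h2 : (PySem.Set.ofList [t]).length = 1 := rfl
    omega
  constructor
  · refine iterate_sound hG ?_ tanks.length x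
    intro y hy
    simp only [PySem.Set.mem_ofList, List.mem_singleton] at hy
    rw [hy]; exact Reach.refl
  · intro hr
    induction hr with
    | refl =>
      exact mem_iterate_of_mem (by simp [PySem.Set.mem_ofList]) tanks.length
    | step hr hm ih =>
      exact closeStep_closed_of_fixed hG (iterate_subset hP hG hsub0 tanks.length) hfix _ hm ih

lemma vrep_insert {tanks : List Int} {v : PySem.Dict Int Bool} {S : List Int} {t : Int}
    (hrep : VRep tanks v S) (ht : t ∈ tanks) : VRep tanks (v.insert t true) (t :: S) := by
  intro x
  rw [PySem.Dict.get?_insert]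
  by_cases hx : x = t
  · subst hx
    simp [ht]
  · rw [if_neg hx, hrep x]
    by_cases hxt : x ∈ tanks
    · rw [if_pos hxt, if_pos hxt]
      congr 1
      simp [List.mem_cons, hx]
    · rw [if_neg hxt, if_neg hxt]

lemma vrep_congr {tanks : List Int} {v : PySem.Dict Int Bool} {S T : List Int}
    (hrep : VRep tanks v S) (h : ∀ x, x ∈ S ↔ x ∈ T) : VRep tanks v T := by
  intro x
  rw [hrep x]
  by_cases hxt : x ∈ tanks
  · rw [if_pos hxt, if_pos hxt]
    exact congrArg some (decide_eq_decide.mpr (h x))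
  · rw [if_neg hxt, if_neg hxt]

-- one DFS call from an unvisited root t on a closed visited set S marks exactly S ∪ Reach t
lemma dfs_run_reach (tanks : List Int) (pipes : List (Int × Int)) (G : PySem.Dict Int (List Int))
    (hP : ∀ p ∈ pipes, p.1 ∈ tanks ∧ p.2 ∈ tanks)
    (hG : ∀ x : Int, G.get? x = if x ∈ tanks then some (adjOf pipes x) else none)
    (t : Int) (ht : t ∈ tanks) (v : PySem.Dict Int Bool) (S : List Int)
    (hrep : VRep tanks v S) (hS : ∀ x ∈ S, x ∈ tanks)
    (hcl : ∀ p ∈ pipes, p.1 ∈ S → p.2 ∈ S) :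
    ∃ S' : List Int,
      VRep tanks (runDFSLoop G [t] (v.insert t true)) S' ∧
      (∀ x : Int, x ∈ S' ↔ (x ∈ S ∨ Reach pipes t x)) ∧
      (∀ x ∈ S', x ∈ tanks) ∧
      (∀ p ∈ pipes, p.1 ∈ S' → p.2 ∈ S') := by
  obtain ⟨S', h1, h2, h3, h4, h5⟩ :=
    dfs_char tanks pipes G hP hG [t] (v.insert t true) (t :: S)
      (vrep_insert hrep ht) (by simp)
      (by
        intro x hx
        rcases List.mem_cons.mp hx with rfl | hx
        · exact ht
        · exact hS x hx)
  have hclosed : ∀ z y : Int, z ∈ S' → (z, y) ∈ pipes → y ∈ S' := by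
    intro z y hz hp
    by_cases hzS : z ∈ t :: S
    · rcases List.mem_cons.mp hzS with rfl | hzS
      · exact h5 z (Or.inl (by simp)) y hp
      · exact h2 y (List.mem_cons_of_mem _ (hcl _ hp hzS))
    · exact h5 z (Or.inr ⟨hz, hzS⟩) y hp
  refine ⟨S', h1, ?_, h3, fun p hp h1' => hclosed p.1 p.2 h1' hp⟩
  intro x
  constructor
  · intro hx
    rcases h4 x hx with hx' | ⟨l, hl, hr⟩
    · rcases List.mem_cons.mp hx' with rfl | hx'
      · exact Or.inr Reach.refl
      · exact Or.inl hx'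
    · rw [List.mem_singleton] at hl
      subst hl
      exact Or.inr hr
  · rintro (hx | hr)
    · exact h2 x (List.mem_cons_of_mem _ hx)
    · induction hr with
      | refl => exact h2 t List.mem_cons_self
      | step hr' hp ih => exact hclosed _ _ ih hp

-- phase 1: the two folds stay in lock step (A's dict represents B's set, same lastVisited)
lemma phase1 (tanks : List Int) (pipes : List (Int × Int)) (G : PySem.Dict Int (List Int))
    (hP : ∀ p ∈ pipes, p.1 ∈ tanks ∧ p.2 ∈ tanks)
    (hG : ∀ x : Int, G.get? x = if x ∈ tanks then some (adjOf pipes x) else none) :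
    ∀ (ts : List Int), (∀ t ∈ ts, t ∈ tanks) →
    ∀ (vA : PySem.Dict Int Bool) (SB : PySem.Set Int) (last : Int),
      VRep tanks vA SB → (∀ x ∈ SB, x ∈ tanks) → (∀ p ∈ pipes, p.1 ∈ SB → p.2 ∈ SB) →
      VRep tanks
        (ts.foldl (fun (st : PySem.Dict Int Bool × Int) t =>
          if st.1.getD t false then st else (runDFSForTankT tanks G t st.1, t)) (vA, last)).1
        (ts.foldl (fun (st : PySem.Set Int × Int) t =>
          if PySem.Set.contains st.1 t then st
          else (PySem.Set.update st.1 (closeTank tanks G t), t)) (SB, last)).1 ∧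
      (ts.foldl (fun (st : PySem.Dict Int Bool × Int) t =>
          if st.1.getD t false then st else (runDFSForTankT tanks G t st.1, t)) (vA, last)).2
        = (ts.foldl (fun (st : PySem.Set Int × Int) t =>
          if PySem.Set.contains st.1 t then st
          else (PySem.Set.update st.1 (closeTank tanks G t), t)) (SB, last)).2 ∧
      (∀ x ∈ (ts.foldl (fun (st : PySem.Set Int × Int) t =>
          if PySem.Set.contains st.1 t then st
          else (PySem.Set.update st.1 (closeTank tanks G t), t)) (SB, last)).1, x ∈ tanks) ∧
      (∀ p ∈ pipes, p.1 ∈ (ts.foldl (fun (st : PySem.Set Int × Int) t =>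
          if PySem.Set.contains st.1 t then st
          else (PySem.Set.update st.1 (closeTank tanks G t), t)) (SB, last)).1
        → p.2 ∈ (ts.foldl (fun (st : PySem.Set Int × Int) t =>
          if PySem.Set.contains st.1 t then st
          else (PySem.Set.update st.1 (closeTank tanks G t), t)) (SB, last)).1) ∧
      ((ts.foldl (fun (st : PySem.Set Int × Int) t =>
          if PySem.Set.contains st.1 t then st
          else (PySem.Set.update st.1 (closeTank tanks G t), t)) (SB, last)).2 = last
        ∨ (ts.foldl (fun (st : PySem.Set Int × Int) t =>
          if PySem.Set.contains st.1 t then st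
          else (PySem.Set.update st.1 (closeTank tanks G t), t)) (SB, last)).2 ∈ ts) := by
  intro ts
  induction ts with
  | nil =>
    intro _ vA SB last hrep hSB hcl
    exact ⟨hrep, rfl, hSB, hcl, Or.inl rfl⟩
  | cons t ts ih =>
    intro hts vA SB last hrep hSB hcl
    have htT : t ∈ tanks := hts t List.mem_cons_self
    have hts' : ∀ z ∈ ts, z ∈ tanks := fun z hz => hts z (List.mem_cons_of_mem _ hz)
    have hcondA : vA.getD t false = decide (t ∈ SB) := by
      rw [PySem.Dict.getD_eq_get?_getD, hrep t, if_pos htT]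
      rfl
    have hcondB : PySem.Set.contains SB t = decide (t ∈ SB) := by
      rw [PySem.Set.contains_eq_listContains]
      by_cases h : t ∈ SB
      · simp [h]
      · simp [h]
    simp only [List.foldl_cons]
    by_cases htS : t ∈ SB
    · rw [if_pos (by rw [hcondA]; exact decide_eq_true htS),
          if_pos (by rw [hcondB]; exact decide_eq_true htS)]
      obtain ⟨c1, c2, c3, c4, c5⟩ := ih hts' vA SB last hrep hSB hcl
      exact ⟨c1, c2, c3, c4, c5.imp id (List.mem_cons_of_mem _)⟩
    · rw [if_neg (by rw [hcondA]; simp [htS]),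
          if_neg (by rw [hcondB]; simp [htS])]
      obtain ⟨S', h1, hmem, h3, hcl'⟩ :=
        dfs_run_reach tanks pipes G hP hG t htT vA SB hrep hSB hcl
      have hmem' : ∀ x : Int, x ∈ S' ↔ x ∈ PySem.Set.update SB (closeTank tanks G t) := by
        intro x
        rw [hmem x, PySem.Set.mem_update, close_mem tanks pipes G hP hG t htT x]
      obtain ⟨c1, c2, c3, c4, c5⟩ := ih hts'
        (runDFSForTankT tanks G t vA) (PySem.Set.update SB (closeTank tanks G t)) t
        (vrep_congr h1 hmem')
        (fun x hx => h3 x ((hmem' x).mpr hx))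
        (fun p hp h1' => (hmem' p.2).mp (hcl' p hp ((hmem' p.1).mpr h1')))
      refine ⟨c1, c2, c3, c4, ?_⟩
      rcases c5 with c5 | c5
      · exact Or.inr (by rw [c5]; exact List.mem_cons_self)
      · exact Or.inr (List.mem_cons_of_mem _ c5)

-- phase 2: A's all-visited check over the dict equals B's all-tanks-in-reach check
lemma phase2_cond (tanks : List Int) (pipes : List (Int × Int)) (G : PySem.Dict Int (List Int))
    (hP : ∀ p ∈ pipes, p.1 ∈ tanks ∧ p.2 ∈ tanks)
    (hG : ∀ x : Int, G.get? x = if x ∈ tanks then some (adjOf pipes x) else none)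
    (last : Int) (hlast : last ∈ tanks) :
    ((runDFSForTankT tanks G last (tanks.foldl (fun d t => d.insert t false) PySem.Dict.empty)).keys.all
      (fun v => (runDFSForTankT tanks G last (tanks.foldl (fun d t => d.insert t false) PySem.Dict.empty)).getD v false))
    = tanks.all (fun t => PySem.Set.contains (closeTank tanks G last) t) := by
  obtain ⟨S'', h1, hmem, h3, hcl⟩ :=
    dfs_run_reach tanks pipes G hP hG last hlast
      (tanks.foldl (fun d t => d.insert t false) PySem.Dict.empty) []
      (rep_build tanks) (by simp) (by simp)
  simp only [runDFSForTankT]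
  set VF := runDFSLoop G [last]
    ((tanks.foldl (fun d t => d.insert t false) PySem.Dict.empty).insert last true) with hVF
  have hmem'' : ∀ x : Int, x ∈ S'' ↔ Reach pipes last x := by
    intro x
    rw [hmem x]
    simp
  have hkeys : ∀ v : Int, v ∈ VF.keys ↔ v ∈ tanks := by
    intro v
    rw [← PySem.Dict.contains_iff_mem_keys, PySem.Dict.contains_eq_isSome_get?, h1 v]
    by_cases hv : v ∈ tanks <;> simp [hv]
  have hgetD : ∀ v ∈ tanks, VF.getD v false = decide (v ∈ S'') := by
    intro v hv
    rw [PySem.Dict.getD_eq_get?_getD, h1 v, if_pos hv]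
    rfl
  have hA : (VF.keys.all (fun v => VF.getD v false)) = true ↔ ∀ v ∈ tanks, Reach pipes last v := by
    rw [List.all_eq_true]
    constructor
    · intro h v hv
      have := h v ((hkeys v).mpr hv)
      rw [hgetD v hv] at this
      exact (hmem'' v).mp (of_decide_eq_true this)
    · intro h v hv
      have hv' : v ∈ tanks := (hkeys v).mp hv
      rw [hgetD v hv']
      exact decide_eq_true ((hmem'' v).mpr (h v hv'))
  have hB : (tanks.all (fun t => PySem.Set.contains (closeTank tanks G last) t)) = true
      ↔ ∀ v ∈ tanks, Reach pipes last v := by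
    rw [List.all_eq_true]
    constructor
    · intro h v hv
      have := h v hv
      rw [PySem.Set.contains_eq_listContains] at this
      exact (close_mem tanks pipes G hP hG last hlast v).mp (List.contains_iff_mem.mp this)
    · intro h v hv
      rw [PySem.Set.contains_eq_listContains]
      exact List.contains_iff_mem.mpr ((close_mem tanks pipes G hP hG last hlast v).mpr (h v hv))
  exact Bool.eq_iff_iff.mpr (hA.trans hB.symm)

theorem findMasterTank_spec : Claim_equal_findMasterTank := by
  intro tanks pipes _hdom hpre
  obtain ⟨hne, hPP⟩ := hpre
  unfold Spec_findMasterTank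
  obtain ⟨t0, rest, rfl⟩ : ∃ t0 rest, tanks = t0 :: rest := by
    cases tanks with
    | nil => exact absurd rfl hne
    | cons a l => exact ⟨a, l, rfl⟩
  simp only [findMasterTank, findMasterTank_alt, PySem.List.pyGet?_zero_cons]
  have hG := G_spec (t0 :: rest) pipes (fun p hp => (hPP p hp).1)
  obtain ⟨c1, c2, c3, c4, c5⟩ :=
    phase1 (t0 :: rest) pipes _ hPP hG (t0 :: rest) (fun t h => h)
      ((t0 :: rest).foldl (fun d t => d.insert t false) PySem.Dict.empty)
      PySem.Set.empty t0
      (rep_build (t0 :: rest)) (by intro x hx; simp [PySem.Set.empty] at hx)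
      (by intro p _ h; simp [PySem.Set.empty] at h)
  have hlastT : (((t0 :: rest).foldl (fun (st : PySem.Set Int × Int) t =>
      if PySem.Set.contains st.1 t then st
      else (PySem.Set.update st.1 (closeTank (t0 :: rest) (pipes.foldl
        (fun d p => match d.get? p.1 with
          | some l => d.insert p.1 (l ++ [p.2])
          | none => d)
        ((t0 :: rest).foldl (fun d i => d.insert i ([] : List Int)) PySem.Dict.empty)) t), t))
      (PySem.Set.empty, t0)).2) ∈ (t0 :: rest) := by
    rcases c5 with c5 | c5
    · rw [c5]; exact List.mem_cons_self
    · exact c5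
  rw [c2, phase2_cond (t0 :: rest) pipes _ hPP hG _ hlastT]
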